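-- pv_equiv track=rewrite | github.com/ReneNyffenegger/BiTuZa | src/create_bituza_database/trash/TuZ_Parser.py | parseBuch
-- ===== SOURCE A (Python) =====
-- def parseBuch(line):
--     space_splitted = line.split(None)
--
--     result_list = []
--     i = -1
--     temp = ""
--     for item in space_splitted:
--         i += 1
--         if i == 2:
--             temp = item
--         elif i == 3:
--             result_list.append(temp + " " + item)
--         #elif i == 4:
--         #    pass
--         else:
--             result_list.append(item)
--
--     return result_list
-- ===== SOURCE B (Python) =====
-- def parseBuch(line):
--     parts = line.split()
--     if len(parts) < 4:
--         return parts[:2]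
--     return parts[:2] + [parts[2] + " " + parts[3]] + parts[4:]
-- ===== Notes on version B (the rewrite author's own statement) =====
-- stated objective: simpler
-- what changed: Replaces the index-counter loop with explicit temp state by a single split followed by slicing and concatenation: the first two fields, then the third and fourth joined with a space when at least four fields exist, then the rest.
import Mathlib
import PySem

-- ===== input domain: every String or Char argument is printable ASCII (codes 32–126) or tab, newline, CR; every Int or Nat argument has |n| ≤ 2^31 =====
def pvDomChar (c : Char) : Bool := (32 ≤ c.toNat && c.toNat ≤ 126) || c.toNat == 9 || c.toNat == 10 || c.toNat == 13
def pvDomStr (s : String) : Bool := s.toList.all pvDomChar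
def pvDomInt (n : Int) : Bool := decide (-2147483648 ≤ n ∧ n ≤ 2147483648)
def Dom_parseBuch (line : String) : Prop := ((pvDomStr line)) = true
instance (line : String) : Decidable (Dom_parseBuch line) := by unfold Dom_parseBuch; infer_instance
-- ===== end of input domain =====

-- B replaces A's index-counter loop (with its temp variable) by one split plus slicing/concatenation; objective: simpler.


-- ===== PORT A =====
-- the for-loop over space_splitted with state (i, temp, result_list)
def parseBuchLoop : List String → Int → String → List String → List String
  | [], _, _, acc => acc
  | item :: rest, i, temp, acc =>
    if i + 1 = 2 then parseBuchLoop rest (i + 1) item acc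
    else if i + 1 = 3 then parseBuchLoop rest (i + 1) temp (acc ++ [temp ++ " " ++ item])
    else parseBuchLoop rest (i + 1) temp (acc ++ [item])

def parseBuch (line : String) : List String :=
  parseBuchLoop (PySem.Str.split₀ line) (-1) "" []

-- ===== PORT B =====
-- parts[:2] + [parts[2] + " " + parts[3]] + parts[4:] when len(parts) >= 4, else parts[:2]
-- (parts[2]/parts[3] via pyGet?; the length guard makes both indices in range, so getD "" never fires)
def parseBuch_alt (line : String) : List String :=
  let parts := PySem.Str.split₀ line
  if parts.length < 4 then PySem.List.slice parts none (some 2)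
  else PySem.List.slice parts none (some 2)
       ++ [((PySem.List.pyGet? parts 2).getD "") ++ " " ++ ((PySem.List.pyGet? parts 3).getD "")]
       ++ PySem.List.slice parts (some 4) none

-- ===== PRECONDITION & SPEC =====
def Spec_parseBuch (line : String) (out : List String) : Prop := out = parseBuch_alt line
instance (line : String) (out : List String) : Decidable (Spec_parseBuch line out) := by unfold Spec_parseBuch; infer_instance

-- ===== CLAIM (what is proved, stated in full; the proofs are below) =====
def Claim_equal_parseBuch : Prop := ∀ (line : String), Dom_parseBuch line → Spec_parseBuch line (parseBuch line)

-- ===== LEMMAS AND PROOFS =====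

-- once the index is ≥ 3, the loop appends every remaining item
theorem parseBuchLoop_tail (xs : List String) : ∀ (i : Int) (temp : String) (acc : List String),
    3 ≤ i → parseBuchLoop xs i temp acc = acc ++ xs := by
  induction xs with
  | nil => intro i temp acc _; simp [parseBuchLoop]
  | cons x rest ih =>
    intro i temp acc hi
    have h2 : ¬ (i + 1 = 2) := by omega
    have h3 : ¬ (i + 1 = 3) := by omega
    rw [parseBuchLoop, if_neg h2, if_neg h3, ih (i + 1) temp (acc ++ [x]) (by omega)]
    simp

theorem parseBuch_eq_alt (line : String) : parseBuch line = parseBuch_alt line := by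
  unfold parseBuch parseBuch_alt
  generalize PySem.Str.split₀ line = parts
  match parts with
  | [] => decide
  | [a] => simp [parseBuchLoop, PySem.List.slice, PySem.List.clampIdx]
  | [a, b] => simp [parseBuchLoop, PySem.List.slice, PySem.List.clampIdx]
  | [a, b, c] => simp [parseBuchLoop, PySem.List.slice, PySem.List.clampIdx]
  | a :: b :: c :: d :: rest =>
    rw [parseBuchLoop]; norm_num
    rw [parseBuchLoop]; norm_num
    rw [parseBuchLoop]; norm_num
    rw [parseBuchLoop]; norm_num
    rw [parseBuchLoop_tail rest 3 c _ (by omega)]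
    have h2 : (2:Int) ≤ (rest.length:Int) + 1 + 1 + 1 := by omega
    have h3 : (3:Int) ≤ (rest.length:Int) + 1 + 1 + 1 := by omega
    have h4 : ¬ (rest.length + 1 + 1 + 1 + 1 < 4) := by omega
    simp [PySem.List.slice, PySem.List.clampIdx, PySem.List.pyGet?, PySem.List.pyIdx?, h2, h3, h4]

-- ===== VERDICT (by name: the statement is the Claim_ definition above) =====
theorem parseBuch_spec : Claim_equal_parseBuch := by
  intro line _
  exact parseBuch_eq_alt line
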